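-- pv_equiv track=rewrite | github.com/tasogarenaki/CS61A | Labor/lab04/lab04.py | add_chars
-- ===== SOURCE A (Python) =====
-- def add_chars(w1, w2):
--     """
--     Return a string containing the characters you need to add to w1 to get w2.
--
--     You may assume that w1 is a subsequence of w2.
--
--     >>> add_chars("owl", "howl")
--     'h'
--     >>> add_chars("want", "wanton")
--     'on'
--     >>> add_chars("rat", "radiate")
--     'diae'
--     >>> add_chars("a", "prepare")
--     'prepre'
--     >>> add_chars("resin", "recursion")
--     'curo'
--     >>> add_chars("fin", "effusion")
--     'efuso'
--     >>> add_chars("coy", "cacophony")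
--     'acphon'
--     >>> from construct_check import check
--     >>> # ban iteration and sets
--     >>> check(LAB_SOURCE_FILE, 'add_chars',
--     ...       ['For', 'While', 'Set', 'SetComp']) # Must use recursion
--     True
--     """
--     "*** YOUR CODE HERE ***"
--     if w1 == '':
--         return w2
--
--     # if the first index is not the same
--     if w1[0] != w2[0]:
--         # then take it out from w2 and search for the next
--         # every time will 1 char shorter since w2[1:] into function
--         # will use as w2[0:]
--         return w2[0] + add_chars(w1[:], w2[1:])
--     else:
--         return add_chars(w1[1:], w2[1:])
-- ===== SOURCE B (Python) =====
-- def add_chars(w1, w2):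
--     i = 0
--     out = []
--     for c in w2:
--         if i < len(w1) and w1[i] == c:
--             i += 1
--         else:
--             out.append(c)
--     return ''.join(out)
-- ===== Notes on version B (the rewrite author's own statement) =====
-- stated objective: faster
-- what changed: Replaced the recursion that re-slices both strings at every step with a single two-pointer pass over w2 (an index into w1 plus an output list, joined once).
import Mathlib
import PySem

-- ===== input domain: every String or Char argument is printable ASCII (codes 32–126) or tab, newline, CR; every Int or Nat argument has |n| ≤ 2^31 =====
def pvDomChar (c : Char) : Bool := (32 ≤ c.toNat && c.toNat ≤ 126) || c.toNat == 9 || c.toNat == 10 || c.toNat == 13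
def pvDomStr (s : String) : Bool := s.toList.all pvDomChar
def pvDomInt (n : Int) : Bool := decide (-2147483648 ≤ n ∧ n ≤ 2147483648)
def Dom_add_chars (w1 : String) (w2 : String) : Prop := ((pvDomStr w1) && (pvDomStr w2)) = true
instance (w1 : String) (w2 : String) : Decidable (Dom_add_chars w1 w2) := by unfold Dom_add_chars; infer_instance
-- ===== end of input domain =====

-- B replaces A's re-slicing recursion with one two-pointer left fold over w2 (asymptotically faster).

-- ===== PORT A =====
-- A's recursion on the two strings; the `(_ :: _, [])` case is where Python raises
-- IndexError on `w2[0]` (excluded by Pre_add_chars).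
def addCharsA : List Char → List Char → List Char
  | [], l2 => l2
  | _ :: _, [] => []          -- Python: IndexError here (outside Pre_)
  | c1 :: t1, c2 :: t2 =>
    if c1 ≠ c2 then c2 :: addCharsA (c1 :: t1) t2
    else addCharsA t1 t2

def add_chars (w1 : String) (w2 : String) : String :=
  String.mk (addCharsA w1.toList w2.toList)

-- ===== PORT B =====
-- Source B: fold over w2 with state (i, reversed output), join at the end.
def addCharsAltStep (cs1 : List Char) (st : Nat × List Char) (c : Char) : Nat × List Char :=
  if st.1 < cs1.length ∧ cs1.getD st.1 ' ' = c then (st.1 + 1, st.2)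
  else (st.1, c :: st.2)

def add_chars_alt (w1 : String) (w2 : String) : String :=
  String.mk ((w2.toList.foldl (addCharsAltStep w1.toList) (0, [])).2.reverse)

-- ===== PRECONDITION & SPEC =====
-- Pre_: exactly the inputs where A returns (w1 a subsequence of w2); elsewhere A raises IndexError.
def Pre_add_chars (w1 : String) (w2 : String) : Prop := w1.toList.Sublist w2.toList
instance (w1 : String) (w2 : String) : Decidable (Pre_add_chars w1 w2) := by
  unfold Pre_add_chars; infer_instance

def pvWitness_add_chars : String × String := ("owl", "howl")

def Spec_add_chars (w1 : String) (w2 : String) (out : String) : Prop := out = add_chars_alt w1 w2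
instance (w1 : String) (w2 : String) (out : String) : Decidable (Spec_add_chars w1 w2 out) := by
  unfold Spec_add_chars; infer_instance

-- ===== CLAIM =====
def Claim_equal_add_chars : Prop := ∀ (w1 : String) (w2 : String), Dom_add_chars w1 w2 → Pre_add_chars w1 w2 → Spec_add_chars w1 w2 (add_chars w1 w2)

-- ===== LEMMAS AND PROOFS =====

lemma drop_cons_facts (cs1 : List Char) (i : Nat) (c1 : Char) (rest : List Char)
    (h : cs1.drop i = c1 :: rest) :
    i < cs1.length ∧ cs1[i]? = some c1 ∧ cs1.drop (i + 1) = rest := by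
  have hlt : i < cs1.length := by
    by_contra hge
    simp [List.drop_eq_nil_iff.mpr (le_of_not_gt hge)] at h
  refine ⟨hlt, ?_, ?_⟩
  · have h0 : (cs1.drop i)[0]? = cs1[i + 0]? := List.getElem?_drop
    simpa [h] using h0.symm
  · have h1 : cs1.drop (i + 1) = (cs1.drop i).drop 1 := by rw [List.drop_drop]
    simp [h1, h]

lemma key (cs1 : List Char) :
    ∀ (l2 l1s : List Char) (i : Nat) (acc : List Char),
      cs1.drop i = l1s → l1s.Sublist l2 →
      (l2.foldl (addCharsAltStep cs1) (i, acc)).2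
        = (addCharsA l1s l2).reverse ++ acc := by
  intro l2
  induction l2 with
  | nil =>
    intro l1s i acc _ h
    have hnil : l1s = [] := List.sublist_nil.mp h
    simp [hnil, addCharsA]
  | cons c t ih =>
    intro l1s i acc hd h
    cases l1s with
    | nil =>
      have hlen : cs1.length ≤ i := List.drop_eq_nil_iff.mp hd
      have hstep : addCharsAltStep cs1 (i, acc) c = (i, c :: acc) := by
        simp [addCharsAltStep]; omega
      have := ih [] i (c :: acc) hd (List.nil_sublist t)
      simp [List.foldl_cons, hstep, this, addCharsA]
    | cons c1 rest =>
      obtain ⟨hlt, hget, hdrop⟩ := drop_cons_facts cs1 i c1 rest hd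
      by_cases hc : c1 = c
      · subst hc
        have hrest : rest.Sublist t := List.cons_sublist_cons.mp h
        have hstep : addCharsAltStep cs1 (i, acc) c1 = (i + 1, acc) := by
          simp [addCharsAltStep, hlt]
          exact (List.getElem?_eq_some_iff.mp hget).2
        have := ih rest (i + 1) acc hdrop hrest
        simp [List.foldl_cons, hstep, this, addCharsA]
      · have hsub : (c1 :: rest).Sublist t := by
          cases h with
          | cons _ h' => exact h'
          | cons₂ _ h' => exact absurd rfl hc
        have hstep : addCharsAltStep cs1 (i, acc) c = (i, c :: acc) := by
          simp [addCharsAltStep, hget]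
          intro _; exact hc
        have := ih (c1 :: rest) i (c :: acc) hd hsub
        simp [List.foldl_cons, hstep, this, addCharsA, hc]

-- ===== VERDICT =====
theorem add_chars_spec : Claim_equal_add_chars := by
  intro w1 w2 _ hpre
  unfold Spec_add_chars add_chars add_chars_alt
  have := key w1.toList w2.toList w1.toList 0 [] (by simp) (by simpa using hpre)
  simp [this]
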